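-- pv_equiv track=rewrite | github.com/haveneer/rust-quicklook-training | rs/benches/plot_benches.py | common_prefix_and_remainder
-- ===== SOURCE A (Python) =====
-- def common_prefix_and_remainder(strings):
--     """
--     This function takes a list of strings and returns a tuple:
--     - the longest common prefix among all the strings
--     - a list of the original strings without this prefix
--     """
--     if not strings:
--         return "", []
--
--     # Initialize the prefix with the first string
--     prefix = strings[0]
--
--     # Adjust the common prefix based on the other strings
--     for s in strings[1:]:
--         while not s.startswith(prefix):
--             prefix = prefix[:-1]  # Remove one character from the right
--             if prefix == "":
--                 break
--         if prefix == "":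
--             break
--
--     # Create a list of strings with the common prefix removed
--     remainders = [s[len(prefix):] for s in strings]
--     return prefix, remainders
-- ===== SOURCE B (Python) =====
-- def common_prefix_and_remainder(strings):
--     """
--     Longest common prefix by a vertical (column) scan plus stripped remainders.
--     """
--     if not strings:
--         return "", []
--
--     first = strings[0]
--     L = min(len(s) for s in strings)
--     i = 0
--     while i < L and all(s[i] == first[i] for s in strings):
--         i += 1
--
--     prefix = first[:i]
--     return prefix, [s[i:] for s in strings]
-- ===== Notes on version B (the rewrite author's own statement) =====
-- stated objective: idiomatic
-- what changed: Replaced A's prefix-shrinking loop (repeated startswith on a shrinking candidate) by a single vertical column scan: advance an index while all strings agree at that column, then take/drop at that index.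
import Mathlib
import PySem

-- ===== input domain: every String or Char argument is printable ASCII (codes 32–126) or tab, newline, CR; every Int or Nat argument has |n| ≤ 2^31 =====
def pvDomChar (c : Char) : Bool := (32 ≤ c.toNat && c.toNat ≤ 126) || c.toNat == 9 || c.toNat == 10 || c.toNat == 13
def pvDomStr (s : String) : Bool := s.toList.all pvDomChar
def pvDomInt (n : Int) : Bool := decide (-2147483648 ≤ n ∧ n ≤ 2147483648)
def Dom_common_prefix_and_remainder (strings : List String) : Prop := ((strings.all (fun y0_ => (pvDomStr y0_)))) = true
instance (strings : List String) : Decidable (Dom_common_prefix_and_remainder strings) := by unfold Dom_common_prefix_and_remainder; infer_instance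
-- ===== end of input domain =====

-- B replaces A's prefix-shrinking startswith loop by a vertical column scan (idiomatic alternative; same results).


-- ===== PORT A =====
-- A's inner `while not s.startswith(prefix): prefix = prefix[:-1]; if prefix == "": break`
-- (an empty prefix always satisfies startswith, so the loop also stops there).
def shrinkA (s : List Char) (p : List Char) : List Char :=
  match p with
  | [] => []
  | c :: cs =>
    if PySem.Chars.startswith s (c :: cs) then c :: cs
    else shrinkA s (c :: cs).dropLast
termination_by p.length
decreasing_by simp

def common_prefix_and_remainder (strings : List String) : String × List String :=
  match strings with
  | [] => ("", [])
  | s0 :: rest =>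
    -- for s in strings[1:]: shrink; `if prefix == "": break` = skip the remaining iterations
    let prefixx := rest.foldl (fun p s => if p = [] then p else shrinkA s.toList p) s0.toList
    -- remainders = [s[len(prefix):] for s in strings]  (nonnegative slice start = drop)
    (String.ofList prefixx, (s0 :: rest).map (fun s => String.ofList (s.toList.drop prefixx.length)))

-- ===== PORT B =====
-- `while i < L and all(s[i] == first[i] for s in strings): i += 1`
-- (the getD default is never read: i < L ≤ len(s) for every s).
def scanB (first : List Char) (strs : List (List Char)) (L i : Nat) : Nat :=
  if h : i < L ∧ strs.all (fun s => s.getD i ' ' == first.getD i ' ') = true then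
    scanB first strs L (i + 1)
  else i
termination_by L - i
decreasing_by omega

def common_prefix_and_remainder_alt (strings : List String) : String × List String :=
  match strings with
  | [] => ("", [])
  | s0 :: rest =>
    let first := s0.toList
    -- L = min(len(s) for s in strings)
    let L := rest.foldl (fun m s => min m s.toList.length) first.length
    let i := scanB first ((s0 :: rest).map String.toList) L 0
    -- prefix = first[:i]; remainders = [s[i:] for s in strings]
    (String.ofList (first.take i), (s0 :: rest).map (fun s => String.ofList (s.toList.drop i)))

-- ===== PRECONDITION & SPEC =====
def Spec_common_prefix_and_remainder (strings : List String) (out : String × List String) : Prop := out = common_prefix_and_remainder_alt strings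
instance (strings : List String) (out : String × List String) : Decidable (Spec_common_prefix_and_remainder strings out) := by unfold Spec_common_prefix_and_remainder; infer_instance

-- ===== CLAIM (what is proved, stated in full; the proofs are below) =====
def Claim_equal_common_prefix_and_remainder : Prop := ∀ (strings : List String), Dom_common_prefix_and_remainder strings → Spec_common_prefix_and_remainder strings (common_prefix_and_remainder strings)

-- ===== LEMMAS AND PROOFS =====

/-- Length of the longest common prefix of two character lists. -/
def lcpLen : List Char → List Char → Nat
  | a :: as, b :: bs => if a = b then lcpLen as bs + 1 else 0
  | _, _ => 0

lemma lcpLen_le_left (a b : List Char) : lcpLen a b ≤ a.length := by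
  induction a generalizing b with
  | nil => simp [lcpLen]
  | cons x xs ih =>
    cases b with
    | nil => simp [lcpLen]
    | cons y ys => simp only [lcpLen]; split_ifs <;> simp [Nat.succ_le_succ (ih ys)]

lemma lcpLen_le_right (a b : List Char) : lcpLen a b ≤ b.length := by
  induction a generalizing b with
  | nil => simp [lcpLen]
  | cons x xs ih =>
    cases b with
    | nil => simp [lcpLen]
    | cons y ys => simp only [lcpLen]; split_ifs <;> simp [Nat.succ_le_succ (ih ys)]

lemma prefix_iff_lcpLen (a b : List Char) : a <+: b ↔ lcpLen a b = a.length := by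
  induction a generalizing b with
  | nil => simp [lcpLen]
  | cons x xs ih =>
    cases b with
    | nil => simp [lcpLen]
    | cons y ys =>
      rw [List.cons_prefix_cons]
      simp only [lcpLen, List.length_cons]
      constructor
      · rintro ⟨hx, hp⟩; simp [hx, (ih ys).mp hp]
      · intro h
        by_cases hx : x = y
        · rw [if_pos hx] at h
          exact ⟨hx, (ih ys).mpr (by omega)⟩
        · rw [if_neg hx] at h
          omega

lemma lcpLen_take (a b : List Char) (k : Nat) : lcpLen (a.take k) b = min k (lcpLen a b) := by
  induction a generalizing b k with
  | nil => simp [lcpLen]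
  | cons x xs ih =>
    cases k with
    | zero => simp [lcpLen]
    | succ k =>
      cases b with
      | nil => simp [lcpLen]
      | cons y ys =>
        simp only [List.take_succ_cons, lcpLen]
        split_ifs <;> simp [ih, Nat.succ_min_succ]

lemma lcpLen_agree (a b : List Char) (i : Nat) (d : Char) (h : i < lcpLen a b) :
    a.getD i d = b.getD i d := by
  induction a generalizing b i with
  | nil => simp [lcpLen] at h
  | cons x xs ih =>
    cases b with
    | nil => simp [lcpLen] at h
    | cons y ys =>
      simp only [lcpLen] at h
      split_ifs at h with hx
      · cases i with
        | zero => simpa using hx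
        | succ i => simpa using ih ys i (by omega)
      · omega

lemma lcpLen_mismatch (a b : List Char) (d : Char)
    (ha : lcpLen a b < a.length) (hb : lcpLen a b < b.length) :
    a.getD (lcpLen a b) d ≠ b.getD (lcpLen a b) d := by
  induction a generalizing b with
  | nil => simp at ha
  | cons x xs ih =>
    cases b with
    | nil => simp at hb
    | cons y ys =>
      by_cases hx : x = y
      · simp only [lcpLen, if_pos hx, List.length_cons, Nat.add_lt_add_iff_right] at ha hb
        simpa [lcpLen, hx] using ih ys ha hb
      · simp only [lcpLen, if_neg hx]
        simpa using hx

lemma shrinkA_eq (s : List Char) : ∀ p : List Char, shrinkA s p = p.take (lcpLen p s) := by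
  have H : ∀ n (p : List Char), p.length ≤ n → shrinkA s p = p.take (lcpLen p s) := by
    intro n
    induction n with
    | zero =>
      intro p hp
      have : p = [] := by cases p <;> simp_all
      subst this; simp [shrinkA, lcpLen]
    | succ n ih =>
      intro p hp
      cases p with
      | nil => simp [shrinkA, lcpLen]
      | cons c cs =>
        rw [shrinkA]
        by_cases h : PySem.Chars.startswith s (c :: cs) = true
        · rw [if_pos h]
          have hpre : (c :: cs) <+: s := (PySem.Chars.startswith_iff s (c :: cs)).mp h
          rw [(prefix_iff_lcpLen _ _).mp hpre, List.take_length]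
        · rw [if_neg h]
          have hnp : ¬ (c :: cs) <+: s := fun hc => h ((PySem.Chars.startswith_iff s (c :: cs)).mpr hc)
          have hlt : lcpLen (c :: cs) s < (c :: cs).length := by
            have hle := lcpLen_le_left (c :: cs) s
            rcases Nat.lt_or_ge (lcpLen (c :: cs) s) (c :: cs).length with h' | h'
            · exact h'
            · exact absurd ((prefix_iff_lcpLen _ _).mpr (le_antisymm hle h')) hnp
          rw [ih ((c :: cs).dropLast) (by simp at hp ⊢; omega)]
          rw [List.dropLast_eq_take, lcpLen_take, List.take_take]
          congr 1
          simp at hlt ⊢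
          omega
  intro p; exact H p.length p le_rfl

lemma foldl_min_le_init {α : Type} (f : α → Nat) (l : List α) (a : Nat) :
    l.foldl (fun k x => min k (f x)) a ≤ a := by
  induction l generalizing a with
  | nil => simp
  | cons x xs ih => exact le_trans (ih _) (min_le_left _ _)

lemma lt_foldl_min {α : Type} (f : α → Nat) (l : List α) (a i : Nat) :
    i < l.foldl (fun k x => min k (f x)) a ↔ i < a ∧ ∀ x ∈ l, i < f x := by
  induction l generalizing a with
  | nil => simp
  | cons x xs ih =>
    simp only [List.foldl_cons, ih, Nat.lt_min, List.mem_cons]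
    constructor
    · rintro ⟨⟨h1, h2⟩, h3⟩
      refine ⟨h1, ?_⟩
      rintro y (rfl | hy)
      · exact h2
      · exact h3 y hy
    · rintro ⟨h1, h2⟩
      exact ⟨⟨h1, h2 x (Or.inl rfl)⟩, fun y hy => h2 y (Or.inr hy)⟩

lemma foldA_gen (s0 : List Char) (l : List String) : ∀ (k : Nat), k ≤ s0.length →
    l.foldl (fun p s => if p = [] then p else shrinkA s.toList p) (s0.take k)
      = s0.take (l.foldl (fun k' s => min k' (lcpLen s0 s.toList)) k) := by
  induction l with
  | nil => intro k _; rfl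
  | cons s ss ih =>
    intro k hk
    have hstep : (if s0.take k = [] then s0.take k else shrinkA s.toList (s0.take k))
        = s0.take (min k (lcpLen s0 s.toList)) := by
      by_cases h : s0.take k = []
      · rw [if_pos h]
        rcases List.take_eq_nil_iff.mp h with h0 | h0
        · subst h0; simp [h]
        · subst h0; simp
      · rw [if_neg h, shrinkA_eq, lcpLen_take, List.take_take]
        congr 1
        omega
    simp only [List.foldl_cons, hstep]
    exact ih _ (le_trans (min_le_left _ _) hk)

lemma cond_iff (s0 : List Char) (rs : List (List Char)) (i : Nat)
    (hi : i ≤ rs.foldl (fun k r => min k (lcpLen s0 r)) s0.length) :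
    (i < rs.foldl (fun m r => min m r.length) s0.length ∧
        ((s0 :: rs).all (fun r => r.getD i ' ' == s0.getD i ' ')) = true)
      ↔ i < rs.foldl (fun k r => min k (lcpLen s0 r)) s0.length := by
  have hKle : ∀ r ∈ rs, rs.foldl (fun k r => min k (lcpLen s0 r)) s0.length ≤ lcpLen s0 r := by
    intro r hr
    rcases Nat.lt_or_ge (lcpLen s0 r) (rs.foldl (fun k r => min k (lcpLen s0 r)) s0.length)
      with h | h
    · exact absurd (((lt_foldl_min _ rs s0.length _).mp h).2 r hr) (lt_irrefl _)
    · exact h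
  constructor
  · rintro ⟨hL, hall⟩
    rw [lt_foldl_min] at hL ⊢
    refine ⟨hL.1, ?_⟩
    intro r hr
    rcases Nat.lt_or_ge i (lcpLen s0 r) with h | h
    · exact h
    · exfalso
      have heq : i = lcpLen s0 r := le_antisymm (le_trans hi (hKle r hr)) h
      have hmis := lcpLen_mismatch s0 r ' ' (by omega) (by rw [← heq]; exact hL.2 r hr)
      simp only [List.all_cons, List.all_eq_true, Bool.and_eq_true, beq_iff_eq] at hall
      exact hmis (by rw [← heq]; exact (hall.2 r hr).symm)
  · intro hK
    have hK' := (lt_foldl_min _ rs s0.length i).mp hK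
    constructor
    · rw [lt_foldl_min]
      exact ⟨hK'.1, fun r hr => lt_of_lt_of_le (hK'.2 r hr) (lcpLen_le_right s0 r)⟩
    · simp only [List.all_cons, List.all_eq_true, Bool.and_eq_true, beq_iff_eq, beq_self_eq_true,
        true_and]
      intro r hr
      exact (lcpLen_agree s0 r i ' ' (hK'.2 r hr)).symm

lemma scan_eq (s0 : List Char) (rs : List (List Char)) :
    ∀ n i, i ≤ rs.foldl (fun k r => min k (lcpLen s0 r)) s0.length →
      rs.foldl (fun k r => min k (lcpLen s0 r)) s0.length - i = n →
      scanB s0 (s0 :: rs) (rs.foldl (fun m r => min m r.length) s0.length) i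
        = rs.foldl (fun k r => min k (lcpLen s0 r)) s0.length := by
  intro n
  induction n with
  | zero =>
    intro i hi hn
    have hiK : i = rs.foldl (fun k r => min k (lcpLen s0 r)) s0.length := by omega
    rw [scanB, dif_neg]
    · exact hiK
    · intro hc
      have := (cond_iff s0 rs i hi).mp hc
      omega
  | succ n ih =>
    intro i hi hn
    have hilt : i < rs.foldl (fun k r => min k (lcpLen s0 r)) s0.length := by omega
    rw [scanB, dif_pos ((cond_iff s0 rs i hi).mpr hilt)]
    exact ih (i + 1) (by omega) (by omega)

-- ===== VERDICT (by name: the statement is the Claim_ definition above) =====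
theorem common_prefix_and_remainder_spec : Claim_equal_common_prefix_and_remainder := by
  intro strings _
  unfold Spec_common_prefix_and_remainder
  cases strings with
  | nil => rfl
  | cons s0 rest =>
    simp only [common_prefix_and_remainder, common_prefix_and_remainder_alt]
    have hA := foldA_gen s0.toList rest s0.toList.length le_rfl
    rw [List.take_length] at hA
    have hKlen : rest.foldl (fun k s => min k (lcpLen s0.toList s.toList)) s0.toList.length
        ≤ s0.toList.length := foldl_min_le_init _ _ _
    have hmapK : (rest.map String.toList).foldl (fun k r => min k (lcpLen s0.toList r))
          s0.toList.length
        = rest.foldl (fun k s => min k (lcpLen s0.toList s.toList)) s0.toList.length := by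
      rw [List.foldl_map]
    have hmapL : (rest.map String.toList).foldl (fun m r => min m r.length) s0.toList.length
        = rest.foldl (fun m s => min m s.toList.length) s0.toList.length := by
      rw [List.foldl_map]
    have hscan := scan_eq s0.toList (rest.map String.toList)
      ((rest.map String.toList).foldl (fun k r => min k (lcpLen s0.toList r)) s0.toList.length)
      0 (by omega) (by omega)
    rw [hmapK, hmapL] at hscan
    simp only [List.map_cons] at hscan ⊢
    rw [hA, hscan]
    have hlen : (s0.toList.take
        (rest.foldl (fun k s => min k (lcpLen s0.toList s.toList)) s0.toList.length)).length
        = rest.foldl (fun k s => min k (lcpLen s0.toList s.toList)) s0.toList.length := by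
      rw [List.length_take]
      omega
    rw [hlen]
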